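-- pv_equiv track=rewrite | github.com/vvp-itsolution/openai_market | its_utils/app_comparative/functions/diff.py | html2list
-- ===== SOURCE A (Python) =====
-- import string
--
-- def html2list(x):
--     mode = 'char'
--     cur = ''
--     out = []
--     for c in x:
--         if mode == 'tag':
--             if c == '>':
--                 cur += c
--                 out.append(cur)
--                 cur = ''
--                 mode = 'char'
--             else:
--                 cur += c
--         elif mode == 'char':
--             if c == '<':
--                 out.append(cur)
--                 cur = c
--                 mode = 'tag'
--             elif c in string.whitespace:
--                 pass
--             else:
--                 cur += c
--     out.append(cur)
--     return filter(lambda x: x is not '', out)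
-- ===== SOURCE B (Python) =====
-- import re
-- import string
--
-- def html2list(x):
--     tokens = []
--     for m in re.findall(r'<[^>]*>?|[^<]+', x):
--         if m[0] == '<':
--             tokens.append(m)
--         else:
--             tokens.append(''.join(c for c in m if c not in string.whitespace))
--     return filter(lambda t: t != '', tokens)
-- ===== Notes on version B (the rewrite author's own statement) =====
-- stated objective: idiomatic
-- what changed: Replaces the explicit two-mode (char/tag) character state machine with a single re.findall over an alternation matching either a tag chunk (from '<' up to and including the next '>', or to the end if unterminated) or a maximal run of text; text chunks have every whitespace character removed and empty tokens are filtered out.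
import Mathlib
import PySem

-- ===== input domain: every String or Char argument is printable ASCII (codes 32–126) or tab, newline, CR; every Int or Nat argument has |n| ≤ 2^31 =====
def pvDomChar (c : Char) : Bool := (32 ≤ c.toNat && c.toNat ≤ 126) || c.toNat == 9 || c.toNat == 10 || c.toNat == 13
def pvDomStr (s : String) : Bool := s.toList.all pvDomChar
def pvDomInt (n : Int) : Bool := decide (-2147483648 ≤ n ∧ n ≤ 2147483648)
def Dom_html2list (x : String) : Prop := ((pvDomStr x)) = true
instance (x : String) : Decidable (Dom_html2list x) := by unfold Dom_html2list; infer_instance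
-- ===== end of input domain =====

-- B replaces A's two-mode character state machine by a regex-style tokenizer (re.findall of
-- '<[^>]*>?|[^<]+') whose matches are emitted as tags or whitespace-stripped text; idiomatic, same cost.
-- Note: both Pythons return a lazy filter object; equivalence is about the sequence of tokens it yields.

-- membership in Python's string.whitespace
def pvWS (c : Char) : Bool :=
  c == ' ' || c == '\t' || c == '\n' || c == Char.ofNat 11 || c == Char.ofNat 12 || c == '\r'

-- ===== PORT A =====
-- A's loop state: (mode == 'tag', cur as list of chars, out)
def stepA (st : Bool × List Char × List String) (c : Char) : Bool × List Char × List String :=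
  match st with
  | (mode, cur, out) =>
    if mode then
      if c == '>' then (false, [], out ++ [String.mk (cur ++ [c])])
      else (true, cur ++ [c], out)
    else
      if c == '<' then (true, [c], out ++ [String.mk cur])
      else if pvWS c then (false, cur, out)
      else (false, cur ++ [c], out)

def html2list (x : String) : List String :=
  match x.toList.foldl stepA (false, [], []) with
  | (_, cur, out) => (out ++ [String.mk cur]).filter (fun t => t ≠ "")

-- ===== PORT B =====
-- hand transcription of re.findall(r'<[^>]*>?|[^<]+', x): at each position the leftmost match is,
-- when the head is '<', a tag chunk up to and including the first '>' (or to the end of the input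
-- when unterminated), and otherwise a maximal run of non-'<' characters; exact for this pattern.
def tokB : List Char → List String
  | [] => []
  | c :: rest =>
    if c == '<' then
      match hd : rest.dropWhile (· != '>') with
      | [] => [String.mk (c :: rest.takeWhile (· != '>'))]
      | g :: rs => String.mk (c :: rest.takeWhile (· != '>') ++ [g]) :: tokB rs
    else
      String.mk (((c :: rest).takeWhile (· != '<')).filter (fun ch => !pvWS ch))
        :: tokB ((c :: rest).dropWhile (· != '<'))
  termination_by l => l.length
  decreasing_by
  · have h1 : (rest.dropWhile (· != '>')).length ≤ rest.length := List.length_dropWhile_le _ _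
    rw [hd] at h1
    simp only [List.length_cons] at h1 ⊢
    omega
  · rename_i hc
    have h1 : (rest.dropWhile (· != '<')).length ≤ rest.length := List.length_dropWhile_le _ _
    rw [List.dropWhile_cons_of_pos (by simpa using hc)]
    simp only [List.length_cons]
    omega

def html2list_alt (x : String) : List String :=
  (tokB x.toList).filter (fun t => t ≠ "")

-- ===== PRECONDITION & SPEC =====
def Spec_html2list (x : String) (out : List String) : Prop := out = html2list_alt x
instance (x : String) (out : List String) : Decidable (Spec_html2list x out) := by unfold Spec_html2list; infer_instance

-- ===== CLAIM (what is proved, stated in full; the proofs are below) =====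
def Claim_equal_html2list : Prop := ∀ (x : String), Dom_html2list x → Spec_html2list x (html2list x)

-- ===== LEMMAS AND PROOFS =====

-- a char-mode run over non-'<' characters only filters whitespace into cur
theorem foldA_char_run (t : List Char) : ∀ (cur : List Char) (out : List String),
    (∀ ch ∈ t, ch ≠ '<') →
    List.foldl stepA (false, cur, out) t = (false, cur ++ t.filter (fun ch => !pvWS ch), out) := by
  induction t with
  | nil => simp
  | cons c t ih =>
    intro cur out h
    have hc : c ≠ '<' := h c (by simp)
    have hrest : ∀ ch ∈ t, ch ≠ '<' := fun ch hm => h ch (by simp [hm])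
    by_cases hw : pvWS c
    · simp [List.foldl_cons, stepA, hc, hw, ih cur out hrest]
    · simp [List.foldl_cons, stepA, hc, hw, ih (cur ++ [c]) out hrest]

-- a tag-mode run over non-'>' characters only accumulates into cur
theorem foldA_tag_run (a : List Char) : ∀ (cur : List Char) (out : List String),
    (∀ ch ∈ a, ch ≠ '>') →
    List.foldl stepA (true, cur, out) a = (true, cur ++ a, out) := by
  induction a with
  | nil => simp
  | cons c a ih =>
    intro cur out h
    have hc : c ≠ '>' := h c (by simp)
    have hrest : ∀ ch ∈ a, ch ≠ '>' := fun ch hm => h ch (by simp [hm])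
    simp [List.foldl_cons, stepA, hc, ih (cur ++ [c]) out hrest]

-- out is only appended to
theorem foldA_out (s : List Char) : ∀ (m : Bool) (cur : List Char) (out : List String),
    List.foldl stepA (m, cur, out) s =
      ((List.foldl stepA (m, cur, []) s).1, (List.foldl stepA (m, cur, []) s).2.1,
        out ++ (List.foldl stepA (m, cur, []) s).2.2) := by
  induction s with
  | nil => simp
  | cons c s ih =>
    intro m cur out
    have hstep : stepA (m, cur, out) c =
        ((stepA (m, cur, []) c).1, (stepA (m, cur, []) c).2.1,
          out ++ (stepA (m, cur, []) c).2.2) := by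
      simp only [stepA]
      split_ifs <;> simp
    simp only [List.foldl_cons, hstep]
    rw [ih (stepA (m, cur, []) c).1 (stepA (m, cur, []) c).2.1
        (out ++ (stepA (m, cur, []) c).2.2)]
    conv_rhs =>
      rw [show stepA (m, cur, []) c =
          ((stepA (m, cur, []) c).1, (stepA (m, cur, []) c).2.1, (stepA (m, cur, []) c).2.2) from rfl]
      rw [ih (stepA (m, cur, []) c).1 (stepA (m, cur, []) c).2.1 (stepA (m, cur, []) c).2.2]
    simp

-- head of a dropWhile result falsifies the predicate
theorem head_dropWhile {p : Char → Bool} : ∀ (l : List Char) {c : Char} {rs : List Char},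
    l.dropWhile p = c :: rs → p c = false := by
  intro l
  induction l with
  | nil => intro c rs h; simp at h
  | cons a l ih =>
    intro c rs h
    by_cases hp : p a
    · rw [List.dropWhile_cons_of_pos hp] at h; exact ih h
    · rw [List.dropWhile_cons_of_neg hp] at h
      cases h; simpa using hp

-- absorbing the split-off (possibly empty) first text token back into tokB
theorem tok_absorb (s : List Char) :
    List.filter (fun t => t ≠ "")
        (String.mk ((s.takeWhile (· != '<')).filter (fun ch => !pvWS ch)) :: tokB (s.dropWhile (· != '<')))
      = List.filter (fun t => t ≠ "") (tokB s) := by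
  have hmk : String.mk ([] : List Char) = "" := by decide
  cases s with
  | nil => simp [tokB, hmk]
  | cons c s =>
    by_cases hc : c = '<'
    · subst hc
      rw [List.takeWhile_cons_of_neg (by simp), List.dropWhile_cons_of_neg (by simp)]
      simp [hmk]
    · conv_rhs => rw [tokB]
      rw [if_neg (by simp [hc])]

def finalizeA (r : Bool × List Char × List String) : List String :=
  (r.2.2 ++ [String.mk r.2.1]).filter (fun t => t ≠ "")

-- main invariant: from char mode with accumulator cur and empty out, the filtered final output
-- is cur glued onto the first text run, followed by B's tokens of the rest
theorem mainG : ∀ (n : Nat) (s : List Char), s.length ≤ n → ∀ (cur : List Char),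
    finalizeA (List.foldl stepA (false, cur, []) s)
      = List.filter (fun t => t ≠ "")
          (String.mk (cur ++ (s.takeWhile (· != '<')).filter (fun ch => !pvWS ch))
            :: tokB (s.dropWhile (· != '<'))) := by
  intro n
  induction n with
  | zero =>
    intro s hs cur
    have : s = [] := List.eq_nil_of_length_eq_zero (Nat.le_zero.mp hs)
    subst this
    simp [finalizeA, tokB]
  | succ n ih =>
    intro s hs cur
    have hsplit : s.takeWhile (· != '<') ++ s.dropWhile (· != '<') = s :=
      List.takeWhile_append_dropWhile
    have hmem : ∀ ch ∈ s.takeWhile (· != '<'), ch ≠ '<' := by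
      intro ch hm; simpa using List.mem_takeWhile_imp hm
    have hlens : (s.dropWhile (· != '<')).length ≤ s.length := List.length_dropWhile_le _ _
    have hfold : List.foldl stepA (false, cur, []) s
        = List.foldl stepA (false, cur ++ (s.takeWhile (· != '<')).filter (fun ch => !pvWS ch), [])
            (s.dropWhile (· != '<')) := by
      conv_lhs => rw [← hsplit]
      rw [List.foldl_append, foldA_char_run _ cur [] hmem]
    rw [hfold]
    cases hd : s.dropWhile (· != '<') with
    | nil => simp [finalizeA, tokB]
    | cons c r =>
      have hc : c = '<' := by simpa using head_dropWhile s hd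
      subst hc
      rw [hd] at hlens
      rw [List.foldl_cons]
      have hstep : stepA (false, cur ++ (s.takeWhile (· != '<')).filter (fun ch => !pvWS ch), []) '<'
          = (true, ['<'], [String.mk (cur ++ (s.takeWhile (· != '<')).filter (fun ch => !pvWS ch))]) := by
        simp [stepA]
      rw [hstep]
      have hrsplit : r.takeWhile (· != '>') ++ r.dropWhile (· != '>') = r :=
        List.takeWhile_append_dropWhile
      have hamem : ∀ ch ∈ r.takeWhile (· != '>'), ch ≠ '>' := by
        intro ch hm; simpa using List.mem_takeWhile_imp hm
      have hlenr : (r.dropWhile (· != '>')).length ≤ r.length := List.length_dropWhile_le _ _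
      have hfold2 : List.foldl stepA
            (true, ['<'], [String.mk (cur ++ (s.takeWhile (· != '<')).filter (fun ch => !pvWS ch))]) r
          = List.foldl stepA
              (true, '<' :: r.takeWhile (· != '>'),
                [String.mk (cur ++ (s.takeWhile (· != '<')).filter (fun ch => !pvWS ch))])
              (r.dropWhile (· != '>')) := by
        conv_lhs => rw [← hrsplit]
        rw [List.foldl_append, foldA_tag_run _ _ _ hamem]
        simp
      rw [hfold2]
      cases hd2 : r.dropWhile (· != '>') with
      | nil =>
        conv_rhs => rw [tokB]
        rw [if_pos (by simp), hd2]
        simp [finalizeA]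
      | cons g rs =>
        have hg : g = '>' := by simpa using head_dropWhile r hd2
        subst hg
        rw [hd2] at hlenr
        rw [List.foldl_cons]
        have hstep2 : stepA
              (true, '<' :: r.takeWhile (· != '>'),
                [String.mk (cur ++ (s.takeWhile (· != '<')).filter (fun ch => !pvWS ch))]) '>'
            = (false, [],
                [String.mk (cur ++ (s.takeWhile (· != '<')).filter (fun ch => !pvWS ch)),
                  String.mk (('<' :: r.takeWhile (· != '>')) ++ ['>'])]) := by
          simp [stepA]
        rw [hstep2, foldA_out rs false [] _]
        have hlen : rs.length ≤ n := by
          simp only [List.length_cons] at hlens hlenr; omega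
        have hih := ih rs hlen []
        simp only [List.nil_append] at hih
        rw [tok_absorb rs] at hih
        conv_rhs => rw [tokB]
        rw [if_pos (by simp), hd2]
        simp only [finalizeA] at hih ⊢
        rw [List.append_assoc, List.filter_append, hih]
        simp only [List.filter_cons, List.filter_nil]
        split_ifs <;> simp

-- ===== VERDICT (by name: the statement is the Claim_ definition above) =====
theorem html2list_spec : Claim_equal_html2list := by
  intro x _
  unfold Spec_html2list html2list html2list_alt
  have h := mainG x.toList.length x.toList (Nat.le_refl _) []
  simp only [List.nil_append] at h
  rw [tok_absorb x.toList] at h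
  simp only [finalizeA] at h
  cases hf : x.toList.foldl stepA (false, [], []) with
  | mk m p =>
    cases p with
    | mk cur out =>
      rw [hf] at h
      simpa using h
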